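-- pv_equiv track=rewrite | github.com/Smallqqqq/InfeRE | run_train.py | norm2
-- ===== SOURCE A (Python) =====
-- def norm2(regex):
--     res = ""
--     flag = False
--     for index in range(len(regex) - 1, -1, -1):
--         if flag and (regex[index] == " " or regex[index] == "("):
--             flag = False
--             res = '<' + res
--         res = regex[index] + res
--         if regex[index] == '>':
--             flag = True
--     if flag == True:
--         res = '<' + res
--     res = ''.join(res.split())
--     return res
-- ===== SOURCE B (Python) =====
-- def norm2(regex):
--     out = []
--     buf = []
--     for ch in regex:
--         if ch == ' ' or ch == '(':
--             if '>' in buf: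
--                 out.append('<')
--             out.extend(buf)
--             out.append(ch)
--             buf = []
--         else:
--             buf.append(ch)
--     if '>' in buf:
--         out.append('<')
--     out.extend(buf)
--     return ''.join(''.join(out).split())
-- ===== Notes on version B (the rewrite author's own statement) =====
-- stated objective: faster
-- what changed: Replaced A's right-to-left scan with a look-behind flag and repeated whole-string prepending by a forward single pass that buffers the current token and flushes it at each delimiter, prepending the marker iff the token contains a close-angle character.
import Mathlib
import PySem

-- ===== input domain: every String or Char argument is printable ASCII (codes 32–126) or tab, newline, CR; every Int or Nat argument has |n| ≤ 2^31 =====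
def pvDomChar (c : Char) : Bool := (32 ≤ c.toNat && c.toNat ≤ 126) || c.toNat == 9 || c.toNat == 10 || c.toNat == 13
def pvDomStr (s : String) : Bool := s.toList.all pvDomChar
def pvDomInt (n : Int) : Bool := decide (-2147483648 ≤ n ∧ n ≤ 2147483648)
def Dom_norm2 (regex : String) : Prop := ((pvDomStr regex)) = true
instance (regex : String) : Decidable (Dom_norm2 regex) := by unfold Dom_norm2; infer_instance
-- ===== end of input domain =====

-- B replaces A's backward scan with a look-behind flag and repeated whole-string prepends by a
-- forward single pass buffering the current token and flushing it at each delimiter (objective: faster).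

-- ===== PORT A =====
-- one step of A's right-to-left loop: state is (res, flag)
def norm2Step (c : Char) (st : List Char × Bool) : List Char × Bool :=
  let st' := if st.2 ∧ (c = ' ' ∨ c = '(') then (('<' :: st.1), false) else st
  let res := c :: st'.1
  let flag := if c = '>' then true else st'.2
  (res, flag)

def norm2 (regex : String) : String :=
  -- the loop 'for index in range(len(regex)-1, -1, -1)' processes the chars right-to-left: foldr
  let st := regex.toList.foldr norm2Step ([], false)
  let res := if st.2 then '<' :: st.1 else st.1
  PySem.Str.join "" (PySem.Str.split₀ (String.mk res))   -- ''.join(res.split())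

-- ===== PORT B =====
-- flush the buffered token: prepend '<' iff it contains '>'
def norm2Flush (buf : List Char) : List Char :=
  if '>' ∈ buf then '<' :: buf else buf

-- forward scan with a current-token buffer
def norm2Go (buf : List Char) : List Char → List Char
  | [] => norm2Flush buf
  | c :: rest =>
      if c = ' ' ∨ c = '(' then norm2Flush buf ++ c :: norm2Go [] rest
      else norm2Go (buf ++ [c]) rest

def norm2_alt (regex : String) : String :=
  PySem.Str.join "" (PySem.Str.split₀ (String.mk (norm2Go [] regex.toList)))

-- ===== PRECONDITION & SPEC =====
def Spec_norm2 (regex : String) (out : String) : Prop := out = norm2_alt regex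
instance (regex : String) (out : String) : Decidable (Spec_norm2 regex out) := by unfold Spec_norm2; infer_instance

-- ===== CLAIM (what is proved, stated in full; the proofs are below) =====
def Claim_equal_norm2 : Prop := ∀ (regex : String), Dom_norm2 regex → Spec_norm2 regex (norm2 regex)

-- ===== LEMMAS AND PROOFS =====

-- the forward scan with buffer buf equals A's backward fold with the buffer glued in front,
-- provided buf contains no delimiter
theorem norm2Go_eq (l : List Char) : ∀ (buf : List Char), ' ' ∉ buf → '(' ∉ buf →
    norm2Go buf l =
      (if (l.foldr norm2Step ([], false)).2 ∨ '>' ∈ buf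
       then '<' :: (buf ++ (l.foldr norm2Step ([], false)).1)
       else buf ++ (l.foldr norm2Step ([], false)).1) := by
  induction l with
  | nil =>
      intro buf _ _
      simp [norm2Go, norm2Flush]
  | cons c rest ih =>
      intro buf hsp hpa
      by_cases hd : c = ' ' ∨ c = '('
      · have hc : norm2Go buf (c :: rest) = norm2Flush buf ++ c :: norm2Go [] rest := by
          simp [norm2Go, hd]
        rw [hc, ih [] (by simp) (by simp)]
        have hcgt : c ≠ '>' := by rcases hd with h | h <;> simp [h]
        rcases hfl : (rest.foldr norm2Step ([], false)) with ⟨res, flag⟩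
        simp only [List.foldr_cons, hfl]
        cases flag <;>
          simp [norm2Step, hd, hcgt, norm2Flush] <;>
          by_cases hb : '>' ∈ buf <;> simp [hb]
      · push_neg at hd
        have hc : norm2Go buf (c :: rest) = norm2Go (buf ++ [c]) rest := by
          simp [norm2Go, hd.1, hd.2]
        rw [hc, ih (buf ++ [c]) (by simp [hsp, Ne.symm hd.1]) (by simp [hpa, Ne.symm hd.2])]
        rcases hfl : (rest.foldr norm2Step ([], false)) with ⟨res, flag⟩
        simp only [List.foldr_cons, hfl]
        have hmem : ('>' ∈ buf ++ [c]) = ('>' ∈ buf ∨ c = '>') := by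
          simp [List.mem_append, eq_comm]
        cases flag <;>
          by_cases hgt : c = '>' <;>
          by_cases hb : '>' ∈ buf <;>
          simp [norm2Step, hd.1, hd.2, hgt, hb, hmem]

-- ===== VERDICT (by name: the statement is the Claim_ definition above) =====
theorem norm2_spec : Claim_equal_norm2 := by
  intro regex _
  unfold Spec_norm2 norm2 norm2_alt
  rw [norm2Go_eq regex.toList [] (by simp) (by simp)]
  rcases hfl : (regex.toList.foldr norm2Step ([], false)) with ⟨res, flag⟩
  cases flag <;> simp
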